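-- pv_equiv track=rewrite | github.com/vladluca70/NumSeq--Python-Library | build/lib/numseq/core.py | fermat_numbers_up_to
-- ===== SOURCE A (Python) =====
-- def fermat_numbers_up_to(n):
--     if n < 1:
--         raise ValueError("Numărul trebuie să fie cel puțin 1")
--
--     fermat_nbrs = []
--     k = 0
--     while True:
--         f = 2**(2**k) + 1
--         if f > n:
--             break
--         fermat_nbrs.append(f)
--         k += 1
--
--     return fermat_nbrs
-- ===== SOURCE B (Python) =====
-- def fermat_numbers_up_to(n):
--     if n < 1:
--         raise ValueError("Numărul trebuie să fie cel puțin 1")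
--     if n < 3:
--         return []
--     # closed-form count: F_k = 2**(2**k)+1 <= n  iff  2**k <= floor(log2(n-1))
--     m = ((n - 1).bit_length() - 1).bit_length()
--     return [2 ** (2 ** k) + 1 for k in range(m)]
-- ===== Notes on version B (the rewrite author's own statement) =====
-- stated objective: alternative
-- what changed: Replaces A's unbounded while-loop with break by a closed-form count of Fermat numbers <= n via two bit_length calls, then builds the list with a comprehension over range(m).
import Mathlib
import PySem

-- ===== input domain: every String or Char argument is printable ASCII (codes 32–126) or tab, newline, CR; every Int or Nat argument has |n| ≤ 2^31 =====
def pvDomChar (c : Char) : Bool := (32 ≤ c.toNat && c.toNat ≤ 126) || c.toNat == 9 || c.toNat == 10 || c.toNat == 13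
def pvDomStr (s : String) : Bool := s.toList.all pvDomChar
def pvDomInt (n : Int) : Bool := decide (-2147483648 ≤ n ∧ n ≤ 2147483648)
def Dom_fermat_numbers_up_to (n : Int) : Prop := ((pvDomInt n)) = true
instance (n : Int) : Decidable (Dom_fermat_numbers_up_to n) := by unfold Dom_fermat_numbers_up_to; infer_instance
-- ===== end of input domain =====

-- B replaces A's break-out while-loop by a closed-form count of Fermat numbers ≤ n
-- (two bit_length computations) followed by a comprehension (objective: alternative).

-- ===== PORT A =====
-- A's 'while True' loop: f = 2^(2^k)+1, break when f > n, else append and k += 1.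
-- The fuel only makes the recursion total; on Dom (|n| ≤ 2^31) the loop breaks
-- after at most 5 iterations, so fuel 35 is never exhausted there.
def fermatLoopA (n : Int) (k : Nat) (acc : List Int) (fuel : Nat) : List Int :=
  match fuel with
  | 0 => acc
  | fuel + 1 =>
    if (2 : Int) ^ (2 ^ k) + 1 > n then acc
    else fermatLoopA n (k + 1) (acc ++ [(2 : Int) ^ (2 ^ k) + 1]) fuel

def fermat_numbers_up_to (n : Int) : List Int :=
  if n < 1 then []   -- Python raises ValueError here; excluded by Pre_
  else fermatLoopA n 0 [] 35

-- ===== PORT B =====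
-- Source B: bit_length of a nonnegative int is Nat.size; the comprehension is a map over range.
def fermat_numbers_up_to_alt (n : Int) : List Int :=
  if n < 1 then []   -- B raises the same ValueError here; excluded by Pre_
  else if n < 3 then []
  else
    (List.range (((n - 1).toNat.size - 1).size)).map (fun k => (2 : Int) ^ (2 ^ k) + 1)

-- ===== PRECONDITION & SPEC =====
-- A (and B) raise ValueError for n < 1; Pre_ excludes exactly those inputs.
def Pre_fermat_numbers_up_to (n : Int) : Prop := 1 ≤ n
instance (n : Int) : Decidable (Pre_fermat_numbers_up_to n) := by
  unfold Pre_fermat_numbers_up_to; infer_instance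

def pvWitness_fermat_numbers_up_to : Int := (17)

def Spec_fermat_numbers_up_to (n : Int) (out : List Int) : Prop := out = fermat_numbers_up_to_alt n
instance (n : Int) (out : List Int) : Decidable (Spec_fermat_numbers_up_to n out) := by unfold Spec_fermat_numbers_up_to; infer_instance

-- ===== CLAIM (what is proved, stated in full; the proofs are below) =====
def Claim_equal_fermat_numbers_up_to : Prop := ∀ (n : Int), Dom_fermat_numbers_up_to n → Pre_fermat_numbers_up_to n → Spec_fermat_numbers_up_to n (fermat_numbers_up_to n)

-- ===== LEMMAS AND PROOFS =====

-- A's loop appends F_k, …, F_{k+j-1} when exactly the first j candidates pass the test.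
theorem loopA_eval (n : Int) (j : Nat) :
    ∀ (k : Nat) (acc : List Int) (fuel : Nat), j ≤ fuel →
      (∀ i, i < j → (2 : Int) ^ (2 ^ (k + i)) + 1 ≤ n) →
      ((2 : Int) ^ (2 ^ (k + j)) + 1 > n) →
      fermatLoopA n k acc fuel = acc ++ (List.range' k j).map (fun i => (2 : Int) ^ (2 ^ i) + 1) := by
  induction j with
  | zero =>
    intro k acc fuel _ _ hgt
    cases fuel with
    | zero => simp [fermatLoopA]
    | succ fuel =>
      have hgt0 : (2 : Int) ^ (2 ^ k) + 1 > n := by simpa using hgt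
      simp only [fermatLoopA]
      rw [if_pos hgt0]
      simp
  | succ j ih =>
    intro k acc fuel hj hle hgt
    cases fuel with
    | zero => omega
    | succ fuel =>
      have h0 : (2 : Int) ^ (2 ^ k) + 1 ≤ n := hle 0 (by omega)
      have hle' : ∀ i, i < j → (2 : Int) ^ (2 ^ ((k + 1) + i)) + 1 ≤ n := by
        intro i hi
        have h := hle (i + 1) (by omega)
        have e : k + (i + 1) = (k + 1) + i := by omega
        rwa [e] at h
      have hgt' : (2 : Int) ^ (2 ^ ((k + 1) + j)) + 1 > n := by
        have e : k + (j + 1) = (k + 1) + j := by omega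
        rwa [e] at hgt
      simp only [fermatLoopA]
      rw [if_neg (not_lt.mpr h0), ih (k + 1) _ fuel (by omega) hle' hgt',
          List.range'_succ]
      simp

-- The closed-form count: for n in the k-th Fermat interval, B's m = size (size (n-1) - 1) = k+1.
theorem size_size_eq (n : Int) (k : Nat)
    (h1 : (2 : Int) ^ (2 ^ k) + 1 ≤ n) (h2 : n ≤ (2 : Int) ^ (2 ^ (k + 1))) :
    ((n - 1).toNat.size - 1).size = k + 1 := by
  have hm : ((n - 1).toNat : Int) = n - 1 := by
    have : (0 : Int) ≤ n - 1 := by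
      have := pow_pos (by norm_num : (0:Int) < 2) (2 ^ k); omega
    exact Int.toNat_of_nonneg this
  have hm1 : 2 ^ 2 ^ k ≤ (n - 1).toNat := by
    have : ((2 : Nat) ^ 2 ^ k : Int) ≤ ((n - 1).toNat : Int) := by push_cast; omega
    exact_mod_cast this
  have hm2 : (n - 1).toNat < 2 ^ 2 ^ (k + 1) := by
    have : ((n - 1).toNat : Int) < ((2 : Nat) ^ 2 ^ (k + 1) : Int) := by push_cast; omega
    exact_mod_cast this
  have hs1 : 2 ^ k < (n - 1).toNat.size := Nat.lt_size.mpr hm1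
  have hs2 : (n - 1).toNat.size ≤ 2 ^ (k + 1) := Nat.size_le.mpr hm2
  have hL1 : 2 ^ k ≤ (n - 1).toNat.size - 1 := by omega
  have hL2 : (n - 1).toNat.size - 1 < 2 ^ (k + 1) := by
    have : (1:Nat) ≤ 2 ^ (k+1) := Nat.one_le_two_pow
    omega
  exact le_antisymm (Nat.size_le.mpr hL2) (Nat.lt_size.mpr hL1)

-- In each Fermat interval, both programs produce the same explicit list.
theorem agree_on_interval (n : Int) (k : Nat)
    (h1 : (2 : Int) ^ (2 ^ k) + 1 ≤ n) (h2 : n ≤ (2 : Int) ^ (2 ^ (k + 1)))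
    (hfuel : k + 1 ≤ 35)
    (hle : ∀ i, i < k + 1 → (2 : Int) ^ (2 ^ i) + 1 ≤ n)
    (hn3 : ¬ n < 3) (hn1 : ¬ n < 1) :
    fermat_numbers_up_to n = fermat_numbers_up_to_alt n := by
  unfold fermat_numbers_up_to fermat_numbers_up_to_alt
  simp only [if_neg hn1, if_neg hn3]
  rw [size_size_eq n k h1 h2,
      loopA_eval n (k + 1) 0 [] 35 hfuel (fun i hi => by simpa using hle i hi)
        (by have h : n < (2 : Int) ^ (2 ^ (k + 1)) + 1 := by linarith
            simpa using h),
      List.range_eq_range']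
  simp

-- ===== VERDICT (by name: the statement is the Claim_ definition above) =====
theorem fermat_numbers_up_to_spec : Claim_equal_fermat_numbers_up_to := by
  intro n hdom hpre
  have hd : -2147483648 ≤ n ∧ n ≤ 2147483648 := by
    have := hdom; unfold Dom_fermat_numbers_up_to pvDomInt at this
    exact of_decide_eq_true this
  have hn1 : ¬ n < 1 := not_lt.mpr hpre
  unfold Spec_fermat_numbers_up_to
  by_cases h3 : n < 3
  · unfold fermat_numbers_up_to fermat_numbers_up_to_alt
    simp only [if_neg hn1, if_pos h3]
    rw [loopA_eval n 0 0 [] 35 (by omega) (by omega) (by norm_num; omega)]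
    simp
  · by_cases h5 : n < 5
    · exact agree_on_interval n 0 (by norm_num; omega) (by norm_num; omega) (by omega)
        (by intro i hi; interval_cases i <;> norm_num <;> omega) h3 hn1
    · by_cases h17 : n < 17
      · exact agree_on_interval n 1 (by norm_num; omega) (by norm_num; omega) (by omega)
          (by intro i hi; interval_cases i <;> norm_num <;> omega) h3 hn1
      · by_cases h257 : n < 257
        · exact agree_on_interval n 2 (by norm_num; omega) (by norm_num; omega) (by omega)
            (by intro i hi; interval_cases i <;> norm_num <;> omega) h3 hn1
        · by_cases h65537 : n < 65537
          · exact agree_on_interval n 3 (by norm_num; omega) (by norm_num; omega) (by omega)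
              (by intro i hi; interval_cases i <;> norm_num <;> omega) h3 hn1
          · exact agree_on_interval n 4 (by norm_num; omega) (by norm_num; omega) (by omega)
              (by intro i hi; interval_cases i <;> norm_num <;> omega) h3 hn1
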